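-- pv_equiv track=rewrite | github.com/wljsxmm/IES-embedded-RL | mp_mdp/economic_dispatch_deteminsitic.py | results_process_condensing
-- ===== SOURCE A (Python) =====
-- from collections import defaultdict
--
-- def results_process_condensing(results):
--     # 使用 defaultdict 初始化一个空字典，使默认值为一个空列表
--     classified_data = defaultdict(list)
--     power_condensing = results["power_condensing"]
--     # 遍历给定的数据字典
--     for key, value in power_condensing.items():
--         hour, generator_type = key
--         classified_data[generator_type].append((hour, value))
--     # 将 defaultdict 转换回普通字典
--     classified_data = dict(classified_data)
--     return classified_data
-- ===== SOURCE B (Python) =====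
-- def results_process_condensing(results):
--     # Recursive group extraction: peel off the first generator type's whole
--     # group, recurse on the remaining entries (which no longer contain it).
--     def go(pairs):
--         if not pairs:
--             return {}
--         (_h0, g0), _v0 = pairs[0]
--         same = [(h, v) for (h, g), v in pairs if g == g0]
--         rest = [((h, g), v) for (h, g), v in pairs if g != g0]
--         return {g0: same, **go(rest)}
--     return go(list(results["power_condensing"].items()))
-- ===== Notes on version B (the rewrite author's own statement) =====
-- stated objective: alternative
-- what changed: Replaces the single-pass defaultdict bucketing with a recursive group-extraction: repeatedly split the list into the first remaining generator type's whole group and the rest, recursing on the rest.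
import Mathlib
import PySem

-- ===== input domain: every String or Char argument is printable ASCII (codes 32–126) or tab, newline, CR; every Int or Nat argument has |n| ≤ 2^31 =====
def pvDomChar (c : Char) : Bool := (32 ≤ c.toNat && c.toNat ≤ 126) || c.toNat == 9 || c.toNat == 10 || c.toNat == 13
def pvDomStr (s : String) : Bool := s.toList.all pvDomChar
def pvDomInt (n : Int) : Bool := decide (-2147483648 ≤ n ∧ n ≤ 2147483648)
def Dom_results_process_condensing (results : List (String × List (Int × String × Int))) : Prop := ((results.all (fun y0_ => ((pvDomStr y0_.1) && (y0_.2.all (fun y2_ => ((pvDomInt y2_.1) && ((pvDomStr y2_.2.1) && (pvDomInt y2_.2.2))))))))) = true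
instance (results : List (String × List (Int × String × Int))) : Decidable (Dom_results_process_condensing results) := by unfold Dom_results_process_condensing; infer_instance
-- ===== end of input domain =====

-- B replaces A's single-pass defaultdict bucketing by a recursive group
-- extraction (peel off the first generator type's whole group, recurse on the
-- rest); an alternative decomposition of similar cost, not claimed faster.

-- ===== PORT A =====
-- results["power_condensing"]: first-match lookup in the association list; [] stands in
-- for the KeyError case, which Pre_ excludes.
def results_process_condensing (results : List (String × List (Int × String × Int))) : List (String × List (Int × Int)) :=
  match (PySem.Dict.mk results).get? "power_condensing" with
  | none => []
  | some pc =>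
    (pc.foldl (fun d e => d.modify e.2.1 [] (· ++ [(e.1, e.2.2)])) PySem.Dict.empty).items

-- ===== PORT B =====
-- go: the recursion of Source B.  '{g0: same, **go(rest)}' is ported as a cons: g0 cannot
-- occur as a key of go(rest), since rest keeps only entries whose type differs from g0.
def pvGo : List (Int × String × Int) → List (String × List (Int × Int))
  | [] => []
  | e :: t =>
    (e.2.1, ((e :: t).filter (fun p => p.2.1 == e.2.1)).map (fun p => (p.1, p.2.2))) ::
      pvGo ((e :: t).filter (fun p => !(p.2.1 == e.2.1)))
termination_by l => l.length
decreasing_by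
  simp only [List.filter_cons, beq_self_eq_true, Bool.not_true, Bool.false_eq_true, if_false,
    List.length_cons]
  exact Nat.lt_succ_of_le (List.length_filter_le _ _)

def results_process_condensing_alt (results : List (String × List (Int × String × Int))) : List (String × List (Int × Int)) :=
  match (PySem.Dict.mk results).get? "power_condensing" with
  | none => []
  | some pc => pvGo pc

-- ===== PRECONDITION & SPEC =====
-- A raises KeyError when "power_condensing" is not a key of results; excluded.
def Pre_results_process_condensing (results : List (String × List (Int × String × Int))) : Prop :=
  "power_condensing" ∈ results.map (·.1)
instance (results : List (String × List (Int × String × Int))) : Decidable (Pre_results_process_condensing results) := by unfold Pre_results_process_condensing; infer_instance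

def pvWitness_results_process_condensing : (List (String × List (Int × String × Int))) :=
  [("power_condensing", [(1, "coal", 5), (2, "coal", 7), (1, "gas", 3)])]

def Spec_results_process_condensing (results : List (String × List (Int × String × Int))) (out : List (String × List (Int × Int))) : Prop := out = results_process_condensing_alt results
instance (results : List (String × List (Int × String × Int))) (out : List (String × List (Int × Int))) : Decidable (Spec_results_process_condensing results out) := by unfold Spec_results_process_condensing; infer_instance

-- ===== CLAIM (what is proved, stated in full; the proofs are below) =====
def Claim_equal_results_process_condensing : Prop := ∀ (results : List (String × List (Int × String × Int))), Dom_results_process_condensing results → Pre_results_process_condensing results → Spec_results_process_condensing results (results_process_condensing results)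

-- ===== LEMMAS AND PROOFS =====

-- A's bucketing loop characterised as dedup-of-types with one filter per type.
theorem bucket_eq (pc : List (Int × String × Int)) :
    (pc.foldl (fun d e => d.modify e.2.1 [] (· ++ [(e.1, e.2.2)])) PySem.Dict.empty).items
      = (PySem.List.dedup (pc.map (fun e => e.2.1))).map
          (fun g => (g, (pc.filter (fun e => e.2.1 == g)).map (fun e => (e.1, e.2.2)))) := by
  have hfold :
      pc.foldl (fun d e => d.modify e.2.1 [] (· ++ [(e.1, e.2.2)])) PySem.Dict.empty
        = (pc.map (fun e => (e.2.1, (e.1, e.2.2)))).foldl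
            (fun d p => d.modify p.1 [] (· ++ [p.2])) PySem.Dict.empty := by
    rw [List.foldl_map]
  set l := pc.map (fun e => (e.2.1, (e.1, e.2.2))) with hl
  have hnd : ((l.foldl (fun d p => d.modify p.1 [] (· ++ [p.2])) PySem.Dict.empty)).keys.Nodup := by
    have := PySem.Dict.nodup_keys_foldl_modify_key l (fun p => p.1) []
      (fun _ p v => v ++ [p.2]) PySem.Dict.empty (by simp [PySem.Dict.keys_empty])
    simpa using this
  rw [hfold]
  rw [PySem.Dict.items_eq_map_keys _ hnd ([] : List (Int × Int))]
  have hkeys : (l.foldl (fun d p => d.modify p.1 [] (· ++ [p.2])) PySem.Dict.empty).keys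
      = PySem.List.dedup (pc.map (fun e => e.2.1)) := by
    rw [PySem.Dict.keys_foldl_modify_key l (fun p => p.1) [] (fun _ p v => v ++ [p.2])
      PySem.Dict.empty]
    simp only [PySem.Dict.keys_empty, hl, List.map_map]
    rfl
  rw [hkeys]
  apply List.map_congr_left
  intro g hg
  have hgetD : (l.foldl (fun d p => d.modify p.1 [] (· ++ [p.2])) PySem.Dict.empty).getD g []
      = (l.filter (fun p => p.1 == g)).map (·.2) := by
    have := PySem.Dict.getD_foldl_modify_append (l := l) (d := PySem.Dict.empty) (c := g)
    simpa [PySem.Dict.getD_empty] using this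
  rw [hgetD, hl, List.filter_map, List.map_map]
  rfl

-- First-occurrence dedup (PySem.Set.ofList) satisfies the 'extract one value' recursion.
theorem foldl_add_skip {α : Type} [BEq α] [LawfulBEq α]
    (a : α) (xs : List α) : ∀ acc : List α, a ∈ acc →
    xs.foldl PySem.Set.add acc = (xs.filter (fun x => !(x == a))).foldl PySem.Set.add acc := by
  induction xs with
  | nil => intro acc _; rfl
  | cons x xs ih =>
    intro acc ha
    by_cases hx : (x == a) = true
    · have hxa : x = a := eq_of_beq hx
      have hadd : PySem.Set.add acc x = acc := by
        simp [PySem.Set.add, PySem.Set.contains, hxa, ha]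
      simp [hx, List.foldl_cons, hadd, ih acc ha]
    · have hmem : a ∈ PySem.Set.add acc x := by
        simp [PySem.Set.add]; split <;> simp [ha]
      simp [hx, List.foldl_cons, ih _ hmem]

theorem foldl_add_cons {α : Type} [BEq α] [LawfulBEq α]
    (a : α) (ys : List α) : ∀ acc : List α, (∀ y ∈ ys, (y == a) = false) →
    ys.foldl PySem.Set.add (a :: acc) = a :: ys.foldl PySem.Set.add acc := by
  induction ys with
  | nil => intro acc _; rfl
  | cons y ys ih =>
    intro acc h
    have hya : (y == a) = false := h y (by simp)
    have hstep : PySem.Set.add (a :: acc) y = a :: PySem.Set.add acc y := by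
      simp only [PySem.Set.add, PySem.Set.contains, List.contains_cons, hya]
      simp only [Bool.false_or]
      split <;> rfl
    simp only [List.foldl_cons, hstep]
    exact ih _ (fun z hz => h z (by simp [hz]))

theorem dedup_cons {α : Type} [BEq α] [LawfulBEq α] (a : α) (xs : List α) :
    PySem.List.dedup (a :: xs) = a :: PySem.List.dedup (xs.filter (fun x => !(x == a))) := by
  show (a :: xs).foldl PySem.Set.add [] = _
  rw [List.foldl_cons]
  have h1 : PySem.Set.add [] a = [a] := by simp [PySem.Set.add, PySem.Set.contains]
  rw [h1, foldl_add_skip a xs [a] (by simp)]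
  exact foldl_add_cons a _ [] (fun y hy => by simpa using (List.of_mem_filter hy))

theorem map_fst_filter_key (c : String) (t : List (Int × String × Int)) :
    (t.filter (fun p => !(p.2.1 == c))).map (fun p => p.2.1)
      = (t.map (fun p => p.2.1)).filter (fun x => !(x == c)) := by
  induction t with
  | nil => rfl
  | cons p t ih =>
    by_cases hp : (p.2.1 == c) = true <;>
      simp [hp, ih]

-- B's recursion computes the same dedup-map-filter normal form as A's loop.
theorem pvGo_eq (l : List (Int × String × Int)) :
    pvGo l = (PySem.List.dedup (l.map (fun e => e.2.1))).map
        (fun g => (g, (l.filter (fun e => e.2.1 == g)).map (fun e => (e.1, e.2.2)))) := by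
  induction l using pvGo.induct with
  | case1 => rw [pvGo]; rfl
  | case2 e t ih =>
    rw [pvGo, List.map_cons, dedup_cons, List.map_cons]
    congr 1
    have hmapf : ((e :: t).filter (fun p => !(p.2.1 == e.2.1))).map (fun p => p.2.1)
        = (t.map (fun p => p.2.1)).filter (fun x => !(x == e.2.1)) := by
      rw [map_fst_filter_key]
      simp [List.filter_cons]
    rw [ih, hmapf]
    apply List.map_congr_left
    intro g hg
    have hgne : (g == e.2.1) = false := by
      have : g ∈ (t.map (fun p => p.2.1)).filter (fun x => !(x == e.2.1)) := by
        simpa [PySem.List.mem_dedup] using hg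
      simpa using (List.of_mem_filter this)
    have hfe : ((e :: t).filter (fun p => !(p.2.1 == e.2.1))).filter (fun p => p.2.1 == g)
        = (e :: t).filter (fun p => p.2.1 == g) := by
      rw [List.filter_filter]
      apply List.filter_congr
      intro p _
      cases hp : (p.2.1 == g) with
      | false => simp [hp]
      | true => simp only [eq_of_beq hp, hgne]; simp [hgne]
    rw [hfe]

-- ===== VERDICT (by name: the statement is the Claim_ definition above) =====
theorem results_process_condensing_spec : Claim_equal_results_process_condensing := by
  intro results _ _
  unfold Spec_results_process_condensing results_process_condensing results_process_condensing_alt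
  cases h : (PySem.Dict.mk results).get? "power_condensing" with
  | none => rfl
  | some pc => dsimp only; rw [bucket_eq, pvGo_eq]
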